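-- pv_equiv track=rewrite | github.com/eilinluna16/Taller-AlgebraComputacional | Taller-AlgebraComputacional/FuncionesPrincipales.py | isZ
-- ===== SOURCE A (Python) =====
-- def isZ(expresion):
--     elem = ['1', '2', '3', '4', '5', '6', '7', '8', '9', '0', '-']
--     expr = list(expresion)
--     num = 0
--     for i in range(len(expr)):
--         if expr[i] in elem:
--             num += 1
--     # Si hay mas de un '-', return False.
--     if expr.count('-')>1:
--         return False
--     # Si no hay elementos diferentes a la lista elem, return True.
--     elif len(expr)==num:
--         # Si hay un '-', nos aseguramos de que este antes del num.
--         if expr.count('-')==1 and expr.index('-')!=0: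
--                 return False
--         return True
--     # Si hay elementos diferentes a la lista elem, return True.
--     else:
--         return False
-- ===== SOURCE B (Python) =====
-- def isZ(expresion):
--     expr = list(expresion)
--     rest = expr[1:] if expr[:1] == ['-'] else expr
--     if '-' in rest:
--         return False
--     return all(c in '0123456789' for c in rest)
-- ===== Notes on version B (the rewrite author's own statement) =====
-- stated objective: simpler
-- what changed: B strips one leading minus sign by slicing and then directly checks that the remainder has no further minus sign and consists of digit characters, replacing A's count-valid-characters-then-compare-to-length logic with its separate count and index passes.
import Mathlib
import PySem

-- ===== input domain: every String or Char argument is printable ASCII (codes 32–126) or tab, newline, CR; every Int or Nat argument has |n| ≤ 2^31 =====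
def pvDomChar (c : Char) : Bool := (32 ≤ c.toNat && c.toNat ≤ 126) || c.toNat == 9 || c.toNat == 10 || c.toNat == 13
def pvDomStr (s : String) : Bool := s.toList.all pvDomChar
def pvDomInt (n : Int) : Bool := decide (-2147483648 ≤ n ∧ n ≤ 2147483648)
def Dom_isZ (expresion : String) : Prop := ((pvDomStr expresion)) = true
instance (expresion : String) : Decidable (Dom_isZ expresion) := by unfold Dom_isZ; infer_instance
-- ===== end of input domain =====

-- B replaces A's count-valid-chars-then-compare-to-length logic (with its separate count
-- and index passes) by a direct sign-strip-then-digit-check decomposition (simpler).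


-- ===== PORT A =====
def elemL : List Char := ['1','2','3','4','5','6','7','8','9','0','-']
def digL : List Char := "0123456789".toList

-- A's local list `elem` and the digit characters of B's literal '0123456789'
-- (shared helper constants for both ports)
def isZ (expresion : String) : Bool :=
  let elem : List Char := elemL
  let expr : List Char := expresion.toList
  let num : Int := (PySem.List.pyRange 0 (expr.length : Int) 1).foldl
    (fun n i => if PySem.List.pyGetD expr i ' ' ∈ elem then n + 1 else n) 0
  if PySem.List.count expr '-' > 1 then false
  else if (expr.length : Int) = num then
    if PySem.List.count expr '-' = 1 ∧ PySem.List.index? expr '-' ≠ some 0 then false else true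
  else false

-- ===== PORT B =====
def isZ_alt (expresion : String) : Bool :=
  let expr : List Char := expresion.toList
  let rest : List Char :=
    if PySem.List.slice expr none (some 1) = ['-'] then PySem.List.slice expr (some 1) none else expr
  if '-' ∈ rest then false
  else rest.all (fun c => c ∈ digL)

-- ===== PRECONDITION & SPEC =====
def Spec_isZ (expresion : String) (out : Bool) : Prop := out = isZ_alt expresion
instance (expresion : String) (out : Bool) : Decidable (Spec_isZ expresion out) := by unfold Spec_isZ; infer_instance

-- ===== CLAIM (what is proved, stated in full; the proofs are below) =====
def Claim_equal_isZ : Prop := ∀ (expresion : String), Dom_isZ expresion → Spec_isZ expresion (isZ expresion)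

-- ===== LEMMAS AND PROOFS =====

lemma mem_elem_iff (c : Char) (h : c ≠ '-') : (c ∈ elemL) ↔ (c ∈ digL) := by
  have hd : digL = ['0','1','2','3','4','5','6','7','8','9'] := by decide
  rw [hd]
  simp only [elemL, List.mem_cons, List.not_mem_nil, or_false]
  tauto

lemma len_countP {cs : List Char} (h : '-' ∉ cs) :
    cs.length = cs.countP (fun c => decide (c ∈ elemL))
      ↔ cs.all (fun c => c ∈ digL) = true := by
  rw [eq_comm, List.countP_eq_length, List.all_eq_true]
  constructor <;> intro h1 c hc <;> have h2 := h1 c hc <;>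
    have hcne : c ≠ '-' := fun e => h (e ▸ hc) <;>
    simp only [decide_eq_true_eq, mem_elem_iff c hcne] at h2 ⊢ <;> exact h2

theorem isZ_main (s : String) : isZ s = isZ_alt s := by
  simp only [isZ, isZ_alt]
  rw [PySem.List.foldl_pyRange_zero_pyGetD' s.toList ' '
        (fun n c => if c ∈ elemL then n + 1 else n) 0,
      PySem.List.foldl_ite_add_one (fun c => c ∈ elemL) s.toList 0]
  rw [PySem.List.slice_to s.toList (by norm_num), PySem.List.slice_from_one]
  simp only [PySem.List.count_eq, zero_add, Int.toNat_one, Nat.cast_inj]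
  generalize s.toList = cs
  rcases cs with _ | ⟨c, t⟩
  · simp
  · simp only [List.take_succ_cons, List.take_zero]
    by_cases hc : c = '-'
    · subst hc
      have hcp : List.countP (fun x => decide (x ∈ elemL)) ('-'::t)
          = List.countP (fun x => decide (x ∈ elemL)) t + 1 := by
        simp [elemL]
      simp only [List.count_cons_self, PySem.List.index?_cons_self, if_true,
        List.tail_cons, ne_eq, not_true_eq_false, and_false, if_false,
        List.length_cons, hcp, Nat.add_right_cancel_iff]
      by_cases hm : '-' ∈ t
      · have hpos : 0 < t.count '-' := List.count_pos_iff.mpr hm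
        rw [if_pos (by omega), if_pos hm]
      · have h0 : t.count '-' = 0 := List.count_eq_zero.mpr hm
        rw [if_neg (by omega), if_neg hm]
        by_cases hL : t.length = t.countP (fun c => decide (c ∈ elemL))
        · rw [if_pos hL, ((len_countP hm).mp hL)]
        · rw [if_neg hL, Eq.comm, Bool.eq_false_iff]
          intro hall
          exact hL ((len_countP hm).mpr hall)
    · have hne : ¬ ([c] = ['-']) := by simp [hc]
      have hcount : List.count '-' (c :: t) = List.count '-' t := by simp [hc]
      rw [if_neg hne]
      simp only [hcount, PySem.List.index?_cons_of_ne t (by exact hc), List.mem_cons]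
      by_cases hm : '-' ∈ t
      · rw [if_pos (Or.inr hm)]
        have hpos : 0 < t.count '-' := List.count_pos_iff.mpr hm
        by_cases h2 : t.count '-' > 1
        · rw [if_pos h2]
        · rw [if_neg h2]
          have h1 : t.count '-' = 1 := by omega
          split_ifs with hL h3
          · rfl
          · exact absurd ⟨h1, by simp⟩ h3
          · rfl
      · have h0 : t.count '-' = 0 := List.count_eq_zero.mpr hm
        have hni : ('-':Char) ∉ c :: t := by
          simp only [List.mem_cons]
          rintro (h | h)
          · exact hc h.symm
          · exact hm h
        rw [if_neg (by omega), if_neg (fun h => hni (List.mem_cons.mpr h))]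
        by_cases hL : (c :: t).length = (c :: t).countP (fun c => decide (c ∈ elemL))
        · rw [if_pos hL, if_neg (by simp [h0]), ((len_countP hni).mp hL)]
        · rw [if_neg hL, Eq.comm, Bool.eq_false_iff]
          intro hall
          exact hL ((len_countP hni).mpr hall)

-- ===== VERDICT (by name: the statement is the Claim_ definition above) =====
theorem isZ_spec : Claim_equal_isZ := by
  intro s _
  unfold Spec_isZ
  exact isZ_main s
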